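-- pv_equiv track=rewrite | github.com/francescomozzatti/tarea | prog/validar_consecutivas_primitiva.py | aux_fila
-- ===== SOURCE A (Python) =====
-- def aux_fila(fila):
--     bandera=1
--     conv=0
--     conn=0
--     for celda in fila:
--         if(celda==0):
--             conv=conv+1
--             conn=0
--         if(celda>0):
--            conv=0
--            conn=conn+1
--         if(conn>2):
--            bandera=0
--         if(conv>2):
--            bandera=0
--
--     return bandera==1
-- ===== SOURCE B (Python) =====
-- def aux_fila(fila):
--     keys = [c == 0 for c in fila if c >= 0]
--     return all(not (a == b and b == c) for a, b, c in zip(keys, keys[1:], keys[2:]))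
-- ===== Notes on version B (the rewrite author's own statement) =====
-- stated objective: idiomatic
-- what changed: Replaced the two manual run counters and the sticky flag with a filter that drops negatives followed by an all() over a sliding window of three consecutive sign-keys (zip of the key list with its two shifts).
import Mathlib
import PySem

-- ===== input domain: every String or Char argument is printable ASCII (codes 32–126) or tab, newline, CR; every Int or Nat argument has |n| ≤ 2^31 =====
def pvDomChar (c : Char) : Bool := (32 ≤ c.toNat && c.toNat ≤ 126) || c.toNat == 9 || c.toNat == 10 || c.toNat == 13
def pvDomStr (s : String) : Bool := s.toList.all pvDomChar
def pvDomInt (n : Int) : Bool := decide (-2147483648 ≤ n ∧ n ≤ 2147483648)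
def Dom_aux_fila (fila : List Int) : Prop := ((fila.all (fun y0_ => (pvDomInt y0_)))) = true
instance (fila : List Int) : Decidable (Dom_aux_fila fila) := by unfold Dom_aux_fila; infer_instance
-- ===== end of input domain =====

-- B replaces A's two manual run counters + sticky flag by filtering out negatives and
-- checking every sliding window of three consecutive sign-keys (idiomatic decomposition).


-- ===== PORT A =====
def aux_filaStep (s : Int × Int × Int) (celda : Int) : Int × Int × Int :=
  let bandera := s.1
  let conv := s.2.1
  let conn := s.2.2
  let (conv, conn) := if celda == 0 then (conv + 1, (0 : Int)) else (conv, conn)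
  let (conv, conn) := if celda > 0 then ((0 : Int), conn + 1) else (conv, conn)
  let bandera := if conn > 2 then (0 : Int) else bandera
  let bandera := if conv > 2 then (0 : Int) else bandera
  (bandera, conv, conn)

def aux_fila (fila : List Int) : Bool :=
  let s := fila.foldl aux_filaStep (1, 0, 0)
  s.1 == 1

-- ===== PORT B =====
def aux_fila_alt (fila : List Int) : Bool :=
  let keys := (fila.filter (fun c => decide (c ≥ 0))).map (fun c => c == 0)
  ((keys.zip (PySem.List.slice keys (some 1) none)).zip (PySem.List.slice keys (some 2) none)).all
    (fun p => !(p.1.1 == p.1.2 && p.1.2 == p.2))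

-- ===== PRECONDITION & SPEC =====
def Spec_aux_fila (fila : List Int) (out : Bool) : Prop := out = aux_fila_alt fila
instance (fila : List Int) (out : Bool) : Decidable (Spec_aux_fila fila out) := by unfold Spec_aux_fila; infer_instance

-- ===== CLAIM (what is proved, stated in full; the proofs are below) =====
def Claim_equal_aux_fila : Prop := ∀ (fila : List Int), Dom_aux_fila fila → Spec_aux_fila fila (aux_fila fila)

-- ===== LEMMAS AND PROOFS =====

/-- Sliding-window "no three consecutive equal keys" check, as a recursion. -/
def win : List Bool → Bool
  | a :: b :: c :: t => (!(a == b && b == c)) && win (b :: c :: t)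
  | _ => true

/-- A's counters, skipping negatives, as a Nat-state recursion. -/
def goodN : Nat → Nat → List Int → Bool
  | _, _, [] => true
  | v, n, c :: t =>
    if c == 0 then decide (v + 1 ≤ 2) && goodN (v + 1) 0 t
    else if 0 < c then decide (n + 1 ≤ 2) && goodN 0 (n + 1) t
    else goodN v n t

lemma step_zero (b v n : Int) : aux_filaStep (b, v, n) 0 = (if v + 1 > 2 then 0 else b, v + 1, 0) := by
  simp [aux_filaStep]

lemma step_pos (c b v n : Int) (hc : 0 < c) :
    aux_filaStep (b, v, n) c = (if n + 1 > 2 then 0 else b, 0, n + 1) := by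
  have h0 : (c == 0) = false := by simp; omega
  simp [aux_filaStep, h0, hc]

lemma step_neg (c b v n : Int) (hc : c < 0) :
    aux_filaStep (b, v, n) c = (if v > 2 then 0 else if n > 2 then 0 else b, v, n) := by
  have h0 : (c == 0) = false := by simp; omega
  have hp : ¬ c > 0 := by omega
  simp [aux_filaStep, h0, hp]

lemma sticky (l : List Int) : ∀ v n : Int, (l.foldl aux_filaStep (0, v, n)).1 = 0 := by
  induction l with
  | nil => intro v n; simp
  | cons c t ih =>
    intro v n
    simp only [List.foldl_cons, aux_filaStep]
    split_ifs <;> exact ih _ _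

lemma foldl_eq_goodN (l : List Int) : ∀ v n : Nat, v ≤ 2 → n ≤ 2 →
    ((l.foldl aux_filaStep (1, (v : Int), (n : Int))).1 == 1) = goodN v n l := by
  induction l with
  | nil => intro v n _ _; simp [goodN]
  | cons c t ih =>
    intro v n hv hn
    rcases lt_trichotomy c 0 with hc | hc | hc
    · have hk0 : (c == 0) = false := by simp; omega
      have hg : goodN v n (c :: t) = goodN v n t := by
        simp only [goodN, hk0, Bool.false_eq_true, if_false]
        rw [if_neg (by omega : ¬ (0 : Int) < c)]
      rw [hg, List.foldl_cons, step_neg c 1 v n hc,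
        if_neg (by omega : ¬ (v : Int) > 2), if_neg (by omega : ¬ (n : Int) > 2),
        ih v n hv hn]
    · subst hc
      have hg : goodN v n ((0 : Int) :: t) = (decide (v + 1 ≤ 2) && goodN (v + 1) 0 t) := by
        simp [goodN]
      rw [hg, List.foldl_cons, step_zero]
      by_cases hv2 : v = 2
      · subst hv2
        rw [if_pos (by norm_num : ((2 : Nat) : Int) + 1 > 2)]
        simp [sticky]
      · rw [if_neg (by omega : ¬ (v : Int) + 1 > 2),
          (by push_cast; ring : ((v : Int) + 1) = ((v + 1 : Nat) : Int)),
          (by norm_num : (0 : Int) = ((0 : Nat) : Int)),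
          ih (v + 1) 0 (by omega) (by omega)]
        have : decide (v + 1 ≤ 2) = true := by simp; omega
        rw [this, Bool.true_and]
    · have hk0 : (c == 0) = false := by simp; omega
      have hg : goodN v n (c :: t) = (decide (n + 1 ≤ 2) && goodN 0 (n + 1) t) := by
        simp only [goodN, hk0, Bool.false_eq_true, if_false]
        rw [if_pos hc]
      rw [hg, List.foldl_cons, step_pos c 1 v n hc]
      by_cases hn2 : n = 2
      · subst hn2
        rw [if_pos (by norm_num : ((2 : Nat) : Int) + 1 > 2)]
        simp [sticky]
      · rw [if_neg (by omega : ¬ (n : Int) + 1 > 2),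
          (by push_cast; ring : ((n : Int) + 1) = ((n + 1 : Nat) : Int)),
          (by norm_num : (0 : Int) = ((0 : Nat) : Int)),
          ih 0 (n + 1) (by omega) (by omega)]
        have : decide (n + 1 ≤ 2) = true := by simp; omega
        rw [this, Bool.true_and]

lemma win_skip (a b : Bool) (k : List Bool) (h : a ≠ b) : win (a :: b :: k) = win (b :: k) := by
  cases k with
  | nil => rfl
  | cons c k2 => cases a <;> cases b <;> simp_all [win]

/-- keys of a row: zero-ness of the nonnegative cells. -/
def keysOf (l : List Int) : List Bool := (l.filter (fun c => decide (c ≥ 0))).map (fun c => c == 0)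

lemma goodN_eq_win (l : List Int) : ∀ v n : Nat, v ≤ 2 → n ≤ 2 → (v = 0 ∨ n = 0) →
    goodN v n l = win (List.replicate v true ++ List.replicate n false ++ keysOf l) := by
  induction l with
  | nil =>
    intro v n hv hn h0
    rcases h0 with rfl | rfl
    · interval_cases n <;> rfl
    · interval_cases v <;> rfl
  | cons c t ih =>
    intro v n hv hn h0
    rcases lt_trichotomy c 0 with hc | hc | hc
    · have hk0 : (c == 0) = false := by simp; omega
      have hf : keysOf (c :: t) = keysOf t := by
        have hd : (decide (c ≥ 0)) = false := by simp; omega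
        simp [keysOf, hd]
      have hg : goodN v n (c :: t) = goodN v n t := by
        simp only [goodN, hk0, Bool.false_eq_true, if_false]
        rw [if_neg (by omega : ¬ (0 : Int) < c)]
      rw [hf, hg, ih v n hv hn h0]
    · subst hc
      have hf : keysOf ((0 : Int) :: t) = true :: keysOf t := by simp [keysOf]
      have hg : goodN v n ((0 : Int) :: t) = (decide (v + 1 ≤ 2) && goodN (v + 1) 0 t) := by
        simp [goodN]
      rw [hf, hg]
      by_cases hv2 : v = 2
      · subst hv2
        rcases h0 with h | rfl
        · omega
        · simp [win]
      · have hlt : v + 1 ≤ 2 := by omega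
        rw [show decide (v + 1 ≤ 2) = true from by simp; omega, Bool.true_and,
          ih (v + 1) 0 (by omega) (by omega) (Or.inr rfl)]
        rcases h0 with rfl | rfl
        · -- v = 0; n ∈ {0,1,2}
          interval_cases n
          · rfl
          · simp only [List.replicate, List.nil_append, List.cons_append]
            rw [win_skip false true _ (by simp)]
          · simp only [List.replicate, List.nil_append, List.cons_append]
            rw [show win (false :: false :: true :: keysOf t) = win (false :: true :: keysOf t) from by
                cases h : keysOf t <;> simp [win],
              win_skip false true _ (by simp)]
        · -- n = 0; v = 1 (v = 2 excluded above)
          interval_cases v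
          · rfl
          · rfl
          · omega
    · have hk0 : (c == 0) = false := by simp; omega
      have hf : keysOf (c :: t) = false :: keysOf t := by
        simp [keysOf, hk0, (by omega : c ≥ 0)]
      have hg : goodN v n (c :: t) = (decide (n + 1 ≤ 2) && goodN 0 (n + 1) t) := by
        simp only [goodN, hk0, Bool.false_eq_true, if_false]
        rw [if_pos hc]
      rw [hf, hg]
      by_cases hn2 : n = 2
      · subst hn2
        rcases h0 with rfl | h
        · simp [win]
        · omega
      · rw [show decide (n + 1 ≤ 2) = true from by simp; omega, Bool.true_and,
          ih 0 (n + 1) (by omega) (by omega) (Or.inl rfl)]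
        rcases h0 with rfl | rfl
        · -- v = 0; n ∈ {0,1}
          interval_cases n
          · rfl
          · rfl
          · omega
        · -- n = 0; v ∈ {0,1,2}
          interval_cases v
          · rfl
          · simp only [List.replicate, List.nil_append, List.cons_append]
            rw [win_skip true false _ (by simp)]
          · simp only [List.replicate, List.nil_append, List.cons_append]
            rw [show win (true :: true :: false :: keysOf t) = win (true :: false :: keysOf t) from by
                cases h : keysOf t <;> simp [win],
              win_skip true false _ (by simp)]

lemma zip_all_eq_win (k : List Bool) :
    (((k.zip (k.drop 1)).zip (k.drop 2)).all (fun p => !(p.1.1 == p.1.2 && p.1.2 == p.2))) = win k := by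
  induction k using win.induct with
  | case1 a b c t ih => simp [win, ← ih]
  | case2 k h =>
    match k with
    | [] => rfl
    | [a] => rfl
    | [a, b] => rfl
    | a :: b :: c :: t => exact absurd rfl (h a b c t)

-- ===== VERDICT (by name: the statement is the Claim_ definition above) =====
theorem aux_fila_spec : Claim_equal_aux_fila := by
  intro fila _
  show aux_fila fila = aux_fila_alt fila
  simp only [aux_fila, aux_fila_alt]
  rw [PySem.List.slice_from (a := 1) _ (by norm_num), PySem.List.slice_from (a := 2) _ (by norm_num),
    show (Int.toNat 1) = 1 from rfl, show (Int.toNat 2) = 2 from rfl, zip_all_eq_win]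
  have h1 := foldl_eq_goodN fila 0 0 (by omega) (by omega)
  norm_num at h1
  rw [h1, goodN_eq_win fila 0 0 (by omega) (by omega) (Or.inl rfl)]
  rfl
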